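-- pv_equiv track=rewrite | github.com/ehu9480/dance-sort-backend | main.py | calculate_collisions
-- ===== SOURCE A (Python) =====
-- def calculate_collisions(schedule, members):
--     collisions = 0
--     member_last_dance = {}
--     for idx, dance in enumerate(schedule):
--         dance_members = members[dance]
--         for member in dance_members:
--             if member in member_last_dance and member_last_dance[member] == idx - 1:
--                 collisions += 1
--         for member in dance_members:
--             member_last_dance[member] = idx
--     return collisions
-- ===== SOURCE B (Python) =====
-- def calculate_collisions(schedule, members):
--     # Stage 1: aggregate the schedule into counts of distinct adjacent dance pairs.
--     pair_counts = {}
--     for prev, cur in zip(schedule, schedule[1:]):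
--         key = (prev, cur)
--         pair_counts[key] = pair_counts.get(key, 0) + 1
--     # Stage 2: compute the cross-collision count once per DISTINCT pair and multiply.
--     total = 0
--     for (prev, cur), n in pair_counts.items():
--         prev_set = set(members[prev])
--         total += n * sum(1 for m in members[cur] if m in prev_set)
--     return total
-- ===== Notes on version B (the rewrite author's own statement) =====
-- stated objective: alternative
-- what changed: Replaces A's persistent member->last-dance-index dict and idx-1 test by a two-stage aggregation: first count the distinct adjacent (prev, cur) dance pairs of the schedule, then compute each distinct pair's cross-collision count once against set(members[prev]) and sum n * cross.
-- outside the precondition, e.g. on calculate_collisions(['a'], {}): A raises KeyError, B returns 0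
import Mathlib
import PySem

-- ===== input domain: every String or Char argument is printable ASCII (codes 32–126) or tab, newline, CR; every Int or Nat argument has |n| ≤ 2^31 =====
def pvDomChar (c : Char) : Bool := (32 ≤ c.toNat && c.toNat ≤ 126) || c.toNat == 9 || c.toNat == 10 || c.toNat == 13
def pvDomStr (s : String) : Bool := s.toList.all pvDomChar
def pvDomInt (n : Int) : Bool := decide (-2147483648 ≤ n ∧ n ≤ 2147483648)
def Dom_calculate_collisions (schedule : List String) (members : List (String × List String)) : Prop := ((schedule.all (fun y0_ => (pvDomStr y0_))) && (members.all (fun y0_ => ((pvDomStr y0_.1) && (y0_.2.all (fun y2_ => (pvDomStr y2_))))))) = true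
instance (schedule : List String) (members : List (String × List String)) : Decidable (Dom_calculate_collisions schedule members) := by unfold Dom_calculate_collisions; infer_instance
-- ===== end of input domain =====

-- B replaces A's persistent member->last-dance-index dict by a two-stage aggregation: count the
-- distinct adjacent (prev, cur) dance pairs, then compute each pair's cross-collision count once
-- and multiply (alternative decomposition; faster only when adjacent pairs repeat).


-- ===== PORT A =====
-- members is a Python dict: association list, lookup = first match; Pre_ below guarantees the key is present.
def pvLookup (members : List (String × List String)) (k : String) : List String :=
  ((members.find? (fun p => p.1 == k)).map (fun p => p.2)).getD []

-- body of A's 'for idx, dance in enumerate(schedule)' loop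
def pvStepA (members : List (String × List String)) (st : Int × PySem.Dict String Int)
    (p : Int × String) : Int × PySem.Dict String Int :=
  let dance_members := pvLookup members p.2
  -- 'if member in member_last_dance and member_last_dance[member] == idx - 1'
  let c := dance_members.foldl
    (fun c m => match PySem.Dict.get? st.2 m with
      | some j => if j = p.1 - 1 then c + 1 else c
      | none => c) st.1
  let d := dance_members.foldl (fun d m => PySem.Dict.insert d m p.1) st.2
  (c, d)

def calculate_collisions (schedule : List String) (members : List (String × List String)) : Int :=
  ((PySem.List.enumerate schedule 0).foldl (pvStepA members) (0, PySem.Dict.empty)).1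

-- ===== PORT B =====
-- "n * sum(1 for m in members[cur] if m in prev_set)" of one distinct pair (prev, cur)
def pvCross (members : List (String × List String)) (p c : String) : Int :=
  (((pvLookup members c).countP
      (fun m => PySem.Set.contains (PySem.Set.ofList (pvLookup members p)) m) : Nat) : Int)

def calculate_collisions_alt (schedule : List String) (members : List (String × List String)) : Int :=
  -- stage 1: pair_counts[key] = pair_counts.get(key, 0) + 1 over zip(schedule, schedule[1:])
  let pair_counts := (schedule.zip (schedule.drop 1)).foldl
    (fun d k => PySem.Dict.insert d k (PySem.Dict.getD d k 0 + 1)) PySem.Dict.empty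
  -- stage 2: total += n * cross(prev, cur) over pair_counts.items()
  pair_counts.items.foldl (fun t kn => t + kn.2 * pvCross members kn.1.1 kn.1.2) 0

-- ===== PRECONDITION & SPEC =====
-- Pre_ excludes exactly the inputs where A raises KeyError: a dance in the schedule missing from members.
def Pre_calculate_collisions (schedule : List String) (members : List (String × List String)) : Prop :=
  schedule.all (fun d => members.any (fun p => p.1 == d)) = true
instance (schedule : List String) (members : List (String × List String)) : Decidable (Pre_calculate_collisions schedule members) := by unfold Pre_calculate_collisions; infer_instance
def pvWitness_calculate_collisions : List String × (List (String × List String)) :=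
  (["a", "b", "a"], [("a", ["x", "y"]), ("b", ["y", "z"])])

def Spec_calculate_collisions (schedule : List String) (members : List (String × List String)) (out : Int) : Prop := out = calculate_collisions_alt schedule members
instance (schedule : List String) (members : List (String × List String)) (out : Int) : Decidable (Spec_calculate_collisions schedule members out) := by unfold Spec_calculate_collisions; infer_instance

-- ===== CLAIM (what is proved, stated in full; the proofs are below) =====
def Claim_equal_calculate_collisions : Prop := ∀ (schedule : List String) (members : List (String × List String)), Dom_calculate_collisions schedule members → Pre_calculate_collisions schedule members → Spec_calculate_collisions schedule members (calculate_collisions schedule members)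

-- ===== LEMMAS AND PROOFS =====

-- proof-only intermediate: the single pass keeping the previous dance's member set
def pvStepM (members : List (String × List String)) (st : Int × Option (PySem.Set String))
    (dance : String) : Int × Option (PySem.Set String) :=
  let cur := pvLookup members dance
  let c := match st.2 with
    | none => st.1
    | some prev => cur.foldl (fun c m => if PySem.Set.contains prev m then c + 1 else c) st.1
  (c, some (PySem.Set.ofList cur))

def pvMid (members : List (String × List String)) (schedule : List String) : Int :=
  (schedule.foldl (pvStepM members) (0, none)).1

-- the per-adjacent-pair sum both programs compute
def pvPS (members : List (String × List String)) (schedule : List String) : Int :=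
  (((schedule.zip (schedule.drop 1)).map (fun k => pvCross members k.1 k.2)).sum)

-- relation between A's dict state (after the dances with indices < k) and the previous-set state
def pvInv (k : Int) (d : PySem.Dict String Int) (prev : Option (PySem.Set String)) : Prop :=
  (∀ m j, d.get? m = some j → j < k) ∧
  (∀ m, d.get? m = some (k - 1) ↔ ∃ L, prev = some L ∧ PySem.Set.contains L m = true)

theorem pv_foldl_matchcount (d : PySem.Dict String Int) (t : Int) (l : List String) :
    ∀ c : Int,
    l.foldl (fun c m => match PySem.Dict.get? d m with
      | some j => if j = t then c + 1 else c
      | none => c) c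
    = c + (l.countP (fun m => PySem.Dict.get? d m == some t) : Int) := by
  induction l with
  | nil => simp
  | cons x xs ih =>
    intro c
    simp only [List.foldl_cons, List.countP_cons, ih]
    cases h : PySem.Dict.get? d x with
    | none => simp [h]
    | some j =>
      by_cases hj : j = t <;> simp [h, hj] <;> push_cast <;> ring

theorem pv_foldl_ifcount (s : PySem.Set String) (l : List String) :
    ∀ c : Int,
    l.foldl (fun c m => if PySem.Set.contains s m then c + 1 else c) c
    = c + (l.countP (fun m => PySem.Set.contains s m) : Int) := by
  induction l with
  | nil => simp
  | cons x xs ih =>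
    intro c
    simp only [List.foldl_cons, List.countP_cons, ih]
    split_ifs <;> simp_all <;> omega

theorem pv_get?_foldl_insert_const (l : List String) (v : Int) :
    ∀ (d : PySem.Dict String Int) (m : String),
    (l.foldl (fun d x => PySem.Dict.insert d x v) d).get? m
    = if m ∈ l then some v else d.get? m := by
  induction l with
  | nil => simp
  | cons x xs ih =>
    intro d m
    simp only [List.foldl_cons, ih, PySem.Dict.get?_insert]
    by_cases hx : m = x <;> by_cases hxs : m ∈ xs <;> simp [hx, hxs]

theorem pv_contains_ofList (l : List String) (m : String) :
    PySem.Set.contains (PySem.Set.ofList l) m = true ↔ m ∈ l := by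
  constructor
  · intro h
    exact (PySem.Set.mem_ofList l m).mp (by simpa [PySem.Set.contains] using h)
  · intro h
    simpa [PySem.Set.contains] using (PySem.Set.mem_ofList l m).mpr h

theorem pvInv_step (k : Int) (d : PySem.Dict String Int) (prev : Option (PySem.Set String))
    (M : List String) (h : pvInv k d prev) :
    pvInv (k + 1) (M.foldl (fun d x => PySem.Dict.insert d x k) d) (some (PySem.Set.ofList M)) := by
  obtain ⟨h1, _⟩ := h
  constructor
  · intro m j hm
    rw [pv_get?_foldl_insert_const] at hm
    split at hm
    · cases hm; omega
    · exact lt_trans (h1 m j hm) (by omega)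
  · intro m
    rw [pv_get?_foldl_insert_const]
    have : k + 1 - 1 = k := by omega
    rw [this]
    by_cases hM : m ∈ M
    · rw [if_pos hM]
      constructor
      · intro _; exact ⟨PySem.Set.ofList M, rfl, (pv_contains_ofList M m).mpr hM⟩
      · intro _; rfl
    · rw [if_neg hM]
      constructor
      · intro hm; exact absurd (h1 m k hm) (by omega)
      · rintro ⟨L, hL, hc⟩
        cases hL
        exact absurd ((pv_contains_ofList M m).mp hc) hM

theorem pv_loop_eq (members : List (String × List String)) (schedule : List String) :
    ∀ (k c : Int) (d : PySem.Dict String Int) (prev : Option (PySem.Set String)),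
    pvInv k d prev →
    ((PySem.List.enumerate schedule k).foldl (pvStepA members) (c, d)).1
    = (schedule.foldl (pvStepM members) (c, prev)).1 := by
  induction schedule with
  | nil => intro k c d prev _; simp [PySem.List.enumerate]
  | cons dance rest ih =>
    intro k c d prev hInv
    rw [PySem.List.enumerate_cons]
    simp only [List.foldl_cons]
    set M := pvLookup members dance with hM
    -- the collision counts added by the two step functions agree
    have hcount :
        (pvStepA members (c, d) (k, dance)).1 = (pvStepM members (c, prev) dance).1 := by
      cases prev with
      | none =>
        simp only [pvStepA, pvStepM, ← hM]
        rw [pv_foldl_matchcount]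
        have hz : M.countP (fun m => PySem.Dict.get? d m == some (k - 1)) = 0 := by
          apply List.countP_eq_zero.mpr
          intro m _
          simp only [beq_iff_eq]
          intro hm
          obtain ⟨L, hL, _⟩ := (hInv.2 m).mp hm
          cases hL
        simp [hz]
      | some L =>
        simp only [pvStepA, pvStepM, ← hM]
        rw [pv_foldl_matchcount, pv_foldl_ifcount]
        congr 2
        apply List.countP_congr
        intro m _
        simp only [beq_iff_eq]
        rw [hInv.2 m]
        constructor
        · rintro ⟨L', hL', hc⟩; cases hL'; exact hc
        · intro hc; exact ⟨L, rfl, hc⟩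
    have hdict : (pvStepA members (c, d) (k, dance)).2
        = M.foldl (fun d x => PySem.Dict.insert d x k) d := by
      simp [pvStepA, ← hM]
    have hset : (pvStepM members (c, prev) dance).2 = some (PySem.Set.ofList M) := by
      cases prev <;> simp [pvStepM, ← hM]
    have hInv' : pvInv (k + 1) (pvStepA members (c, d) (k, dance)).2
        (pvStepM members (c, prev) dance).2 := by
      rw [hdict, hset]; exact pvInv_step k d prev M hInv
    calc (List.foldl (pvStepA members) (pvStepA members (c, d) (k, dance))
            (PySem.List.enumerate rest (k + 1))).1
        = (List.foldl (pvStepM members) ((pvStepA members (c, d) (k, dance)).1,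
            (pvStepM members (c, prev) dance).2) rest).1 :=
          ih (k + 1) (pvStepA members (c, d) (k, dance)).1
            (pvStepA members (c, d) (k, dance)).2 (pvStepM members (c, prev) dance).2 hInv'
      _ = (List.foldl (pvStepM members) (pvStepM members (c, prev) dance) rest).1 := by
          rw [hcount]

theorem pv_A_eq_mid (members : List (String × List String)) (schedule : List String) :
    calculate_collisions schedule members = pvMid members schedule := by
  unfold calculate_collisions pvMid
  apply pv_loop_eq
  constructor
  · intro m j hm; simp [PySem.Dict.get?, PySem.Dict.empty] at hm
  · intro m
    constructor
    · intro hm; simp [PySem.Dict.get?, PySem.Dict.empty] at hm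
    · rintro ⟨L, hL, _⟩; cases hL

-- the single pass computes the per-adjacent-pair sum
theorem pv_mid_loop (members : List (String × List String)) (rest : List String) :
    ∀ (p : String) (c : Int),
    (rest.foldl (pvStepM members) (c, some (PySem.Set.ofList (pvLookup members p)))).1
    = c + pvPS members (p :: rest) := by
  induction rest with
  | nil => intro p c; simp [pvPS]
  | cons q rest' ih =>
    intro p c
    simp only [List.foldl_cons]
    have hstep : pvStepM members (c, some (PySem.Set.ofList (pvLookup members p))) q
        = (c + pvCross members p q, some (PySem.Set.ofList (pvLookup members q))) := by
      simp only [pvStepM, pvCross]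
      rw [pv_foldl_ifcount]
    rw [hstep, ih q (c + pvCross members p q)]
    simp only [pvPS, List.zip_cons_cons, List.drop_succ_cons, List.drop_zero, List.map_cons,
      List.sum_cons]
    ring

theorem pv_mid_eq_PS (members : List (String × List String)) (schedule : List String) :
    pvMid members schedule = pvPS members schedule := by
  cases schedule with
  | nil => simp [pvMid, pvPS]
  | cons d rest =>
    unfold pvMid
    simp only [List.foldl_cons]
    have hstep : pvStepM members (0, none) d
        = (0, some (PySem.Set.ofList (pvLookup members d))) := by
      simp [pvStepM]
    rw [hstep, pv_mid_loop members rest d 0, zero_add]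

-- summing g bumped by c at one element of a Nodup list
theorem pv_sum_bump (x : String × String) (c : Int) (g : String × String → Int) :
    ∀ s : List (String × String), s.Nodup → x ∈ s →
    (s.map (fun k => g k + if k = x then c else 0)).sum = (s.map g).sum + c := by
  intro s
  induction s with
  | nil => intro _ h; cases h
  | cons y ys ih =>
    intro hnd hx
    simp only [List.map_cons, List.sum_cons]
    rcases List.mem_cons.mp hx with hy | hy
    · subst hy
      have hnot : x ∉ ys := (List.nodup_cons.mp hnd).1
      have hys : (ys.map (fun k => g k + if k = x then c else 0)).sum = (ys.map g).sum := by
        apply congrArg List.sum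
        apply List.map_congr_left
        intro k hk
        have hkx : k ≠ x := fun h => hnot (h ▸ hk)
        simp [hkx]
      rw [hys]; simp; ring
    · have hyx : (y = x) = False := by
        simp only [eq_iff_iff, iff_false]
        intro h; exact (List.nodup_cons.mp hnd).1 (h ▸ hy)
      rw [ih (List.nodup_cons.mp hnd).2 hy]
      simp [hyx]; ring

-- grouping: sum over distinct elements weighted by multiplicity = plain sum
theorem pv_sum_count_mul (f : String × String → Int) (l : List (String × String)) :
    (((PySem.Set.ofList l).map (fun k => (l.count k : Int) * f k)).sum) = (l.map f).sum := by
  induction l using List.reverseRecOn with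
  | nil => simp [PySem.Set.ofList]
  | append_singleton l x ih =>
    rw [PySem.Set.ofList_append_singleton]
    by_cases hx : x ∈ l
    · rw [PySem.Set.add_of_mem ((PySem.Set.mem_ofList l x).mpr hx)]
      have hmem : x ∈ PySem.Set.ofList l := (PySem.Set.mem_ofList l x).mpr hx
      have hcnt : ∀ k : String × String,
          ((l ++ [x]).count k : Int) * f k
          = (l.count k : Int) * f k + if k = x then f x else 0 := by
        intro k
        rw [List.count_append]
        by_cases hk : k = x
        · subst hk; simp; push_cast; ring
        · have h0 : List.count k [x] = 0 := List.count_eq_zero.mpr (by simp [hk])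
          simp [h0, hk]
      calc ((PySem.Set.ofList l).map (fun k => ((l ++ [x]).count k : Int) * f k)).sum
          = ((PySem.Set.ofList l).map
              (fun k => (l.count k : Int) * f k + if k = x then f x else 0)).sum := by
            apply congrArg List.sum; apply List.map_congr_left; intro k _; exact hcnt k
        _ = ((PySem.Set.ofList l).map (fun k => (l.count k : Int) * f k)).sum + f x :=
            pv_sum_bump x (f x) _ (PySem.Set.ofList l) (PySem.Set.nodup_ofList l) hmem
        _ = (l.map f).sum + f x := by rw [ih]
        _ = ((l ++ [x]).map f).sum := by simp
    · rw [PySem.Set.add_of_not_mem (fun h => hx ((PySem.Set.mem_ofList l x).mp h))]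
      have hcong : ((PySem.Set.ofList l).map (fun k => ((l ++ [x]).count k : Int) * f k)).sum
          = ((PySem.Set.ofList l).map (fun k => (l.count k : Int) * f k)).sum := by
        apply congrArg List.sum; apply List.map_congr_left
        intro k hk
        have hkx : k ≠ x := fun h => hx (h ▸ (PySem.Set.mem_ofList l k).mp hk)
        have h0 : List.count k [x] = 0 := List.count_eq_zero.mpr (by simp [hkx])
        rw [List.count_append, h0]
        simp
      have h0 : List.count x l = 0 := List.count_eq_zero.mpr hx
      simp only [List.map_append, List.sum_append, List.map_cons, List.map_nil, List.sum_cons,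
        List.sum_nil, hcong, ih]
      rw [List.count_append, h0]
      simp

theorem pv_B_eq_PS (members : List (String × List String)) (schedule : List String) :
    calculate_collisions_alt schedule members = pvPS members schedule := by
  unfold calculate_collisions_alt
  simp only [PySem.Dict.foldl_insert_getD_add_one_eq_counter, PySem.Dict.items_counter]
  rw [PySem.List.foldl_add (g := fun kn : (String × String) × Int =>
    kn.2 * pvCross members kn.1.1 kn.1.2)]
  simp only [List.map_map, zero_add]
  have : ((PySem.Set.ofList (schedule.zip (schedule.drop 1))).map
      ((fun kn : (String × String) × Int => kn.2 * pvCross members kn.1.1 kn.1.2) ∘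
        fun k => (k, ((schedule.zip (schedule.drop 1)).count k : Int)))).sum
      = ((PySem.Set.ofList (schedule.zip (schedule.drop 1))).map
        (fun k => ((schedule.zip (schedule.drop 1)).count k : Int)
          * pvCross members k.1 k.2)).sum := rfl
  rw [this, pv_sum_count_mul (fun k => pvCross members k.1 k.2)]
  rfl

-- ===== VERDICT (by name: the statement is the Claim_ definition above) =====
theorem calculate_collisions_spec : Claim_equal_calculate_collisions := by
  intro schedule members _ _
  unfold Spec_calculate_collisions
  rw [pv_A_eq_mid, pv_mid_eq_PS, pv_B_eq_PS]
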